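-- pv_equiv track=rewrite | github.com/FahmiSMH/streamlit-practice | source/prepro.py | noSpecial
-- ===== SOURCE A (Python) =====
-- def noSpecial(string):
--     # Split the input string into words
--     words = string.split()
--
--     # Initialize an empty list to store cleaned words
--     cleaned_words = []
--
--     # Iterate over each word
--     for word in words:
--         # Remove special characters from the word and append to cleaned_words
--         cleaned_word = ''.join(char for char in word if char.isalnum())
--         cleaned_words.append(cleaned_word)
--
--     # Join the cleaned words back into a string
--     result = ' '.join(cleaned_words)
--
--     return result
-- ===== SOURCE B (Python) =====
-- def noSpecial(string):
--     # Single-pass scanner: walk the string once; at each token start emit one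
--     # separating space (except before the first token), then copy the token's
--     # alphanumeric characters.
--     out = []
--     first = True
--     i = 0
--     n = len(string)
--     while i < n:
--         if string[i].isspace():
--             i += 1
--             continue
--         if not first:
--             out.append(' ')
--         first = False
--         while i < n and not string[i].isspace():
--             if string[i].isalnum():
--                 out.append(string[i])
--             i += 1
--     return ''.join(out)
-- ===== Notes on version B (the rewrite author's own statement) =====
-- stated objective: alternative
-- what changed: Replaces split()/per-word filter/join with a single-pass index scanner that emits separator spaces at token starts and copies alphanumeric characters directly, never materialising the word list.
import Mathlib
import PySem

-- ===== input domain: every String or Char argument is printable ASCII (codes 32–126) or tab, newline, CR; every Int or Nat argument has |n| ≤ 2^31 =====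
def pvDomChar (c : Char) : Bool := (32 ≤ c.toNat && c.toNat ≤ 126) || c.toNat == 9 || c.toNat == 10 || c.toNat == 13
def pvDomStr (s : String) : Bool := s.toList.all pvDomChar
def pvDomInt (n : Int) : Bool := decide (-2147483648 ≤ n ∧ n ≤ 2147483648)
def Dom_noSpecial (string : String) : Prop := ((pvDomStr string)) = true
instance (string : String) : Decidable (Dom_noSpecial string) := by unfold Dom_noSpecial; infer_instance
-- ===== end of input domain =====

-- B replaces split()/filter/join with a single-pass scanner over the characters (alternative decomposition, same cost).

-- ===== PORT A =====
def noSpecial (string : String) : String :=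
  -- words = string.split()
  let words := PySem.Str.split₀ string
  -- for word in words: cleaned_words.append(''.join(char for char in word if char.isalnum()))
  let cleaned_words := words.foldl
    (fun acc word =>
      acc ++ [PySem.Str.join "" ((word.toList.filter PySem.Chars.isalnum).map (fun c => String.ofList [c]))])
    ([] : List String)
  -- result = ' '.join(cleaned_words)
  PySem.Str.join " " cleaned_words

-- ===== PORT B =====
-- inner while loop of Source B: consume one run of non-whitespace chars, keeping the alnum ones;
-- returns (kept chars, remaining input after the run)
def pvConsume : List Char → List Char × List Char
  | [] => ([], [])
  | c :: rest =>
    if PySem.Chars.isspace c then ([], c :: rest)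
    else
      let r := pvConsume rest
      ((if PySem.Chars.isalnum c then [c] else []) ++ r.1, r.2)

theorem pvConsume_snd_length : ∀ cs : List Char, (pvConsume cs).2.length ≤ cs.length := by
  intro cs
  induction cs with
  | nil => simp [pvConsume]
  | cons c rest ih =>
    simp only [pvConsume]
    split
    · simp
    · simpa using Nat.le_succ_of_le ih

-- outer while loop of Source B: skip whitespace; at a token start emit ' ' unless first, then the kept chars
def pvScan : List Char → Bool → List Char
  | [], _ => []
  | c :: rest, first =>
    if PySem.Chars.isspace c then pvScan rest first
    else
      (if first then [] else [' ']) ++ (pvConsume (c :: rest)).1 ++ pvScan (pvConsume (c :: rest)).2 false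
termination_by cs _ => cs.length
decreasing_by
  · simp
  rename_i hns
  have hns' : PySem.Chars.isspace c = false := by simpa using hns
  have h : (pvConsume (c :: rest)).2.length ≤ rest.length := by
    simp only [pvConsume, hns']
    simpa using pvConsume_snd_length rest
  simpa using Nat.lt_succ_of_le h

def noSpecial_alt (string : String) : String :=
  String.ofList (pvScan string.toList true)

-- ===== PRECONDITION & SPEC =====
def Spec_noSpecial (string : String) (out : String) : Prop := out = noSpecial_alt string
instance (string : String) (out : String) : Decidable (Spec_noSpecial string out) := by unfold Spec_noSpecial; infer_instance

-- ===== CLAIM (what is proved, stated in full; the proofs are below) =====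
def Claim_equal_noSpecial : Prop := ∀ (string : String), Dom_noSpecial string → Spec_noSpecial string (noSpecial string)

-- ===== LEMMAS AND PROOFS =====

-- reference word splitter (proof-only): str.split()'s tokens
def pvWords : List Char → List (List Char)
  | [] => []
  | c :: rest =>
    if PySem.Chars.isspace c then pvWords rest
    else (c :: rest.takeWhile (fun d => !PySem.Chars.isspace d)) :: pvWords (rest.dropWhile (fun d => !PySem.Chars.isspace d))
termination_by cs => cs.length
decreasing_by
  · simp
  · simpa using Nat.lt_succ_of_le (List.length_dropWhile_le _ _)

theorem pv_go_words (n : Nat) : ∀ (cs cur : List Char) (acc : List (List Char)), cs.length ≤ n →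
    PySem.Chars.split₀.go cs cur acc =
      acc.reverse ++ (if cur.isEmpty then pvWords cs
        else (cur.reverse ++ cs.takeWhile (fun d => !PySem.Chars.isspace d)) ::
          pvWords (cs.dropWhile (fun d => !PySem.Chars.isspace d))) := by
  induction n with
  | zero =>
    intro cs cur acc h
    have : cs = [] := List.eq_nil_of_length_eq_zero (Nat.le_zero.mp h)
    subst this
    cases cur <;> simp [PySem.Chars.split₀.go, pvWords]
  | succ n ih =>
    intro cs cur acc h
    cases cs with
    | nil => cases cur <;> simp [PySem.Chars.split₀.go, pvWords]
    | cons c rest =>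
      have hr : rest.length ≤ n := by simpa using Nat.lt_succ_iff.mp (Nat.lt_of_lt_of_le (Nat.lt_succ_of_le (Nat.le_refl _)) h)
      by_cases hs : PySem.Chars.isspace c = true
      · cases cur with
        | nil =>
          simp only [PySem.Chars.split₀.go, hs, if_pos, List.isEmpty_nil]
          rw [ih rest [] acc hr]
          simp [pvWords, hs]
        | cons x xs =>
          simp only [PySem.Chars.split₀.go, hs, if_pos, List.isEmpty_cons]
          rw [ih rest [] ((x :: xs).reverse :: acc) hr]
          simp [pvWords, hs, List.takeWhile, List.dropWhile]
      · have hs' : PySem.Chars.isspace c = false := by simpa using hs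
        simp only [PySem.Chars.split₀.go, hs', if_neg, Bool.false_eq_true, not_false_iff]
        rw [ih rest (c :: cur) acc hr]
        cases cur <;> simp [pvWords, hs', List.takeWhile, List.dropWhile]
      
theorem pv_split₀_eq_words (cs : List Char) : PySem.Chars.split₀ cs = pvWords cs := by
  simpa using pv_go_words cs.length cs [] [] (Nat.le_refl _)

theorem pv_intercalate_cons (x : List Char) (l : List (List Char)) :
    List.intercalate [' '] (x :: l) = x ++ l.flatMap (fun w => ' ' :: w) := by
  induction l generalizing x with
  | nil => simp [List.intercalate]
  | cons y t ih =>
    simp only [List.intercalate, List.intersperse] at *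
    simp [List.flatten, ih y]

theorem pv_consume_eq (cs : List Char) :
    pvConsume cs = ((cs.takeWhile (fun d => !PySem.Chars.isspace d)).filter PySem.Chars.isalnum,
      cs.dropWhile (fun d => !PySem.Chars.isspace d)) := by
  induction cs with
  | nil => simp [pvConsume]
  | cons c rest ih =>
    by_cases hs : PySem.Chars.isspace c = true
    · simp [pvConsume, hs, List.takeWhile, List.dropWhile]
    · have hs' : PySem.Chars.isspace c = false := by simpa using hs
      simp only [pvConsume, hs', ih, List.takeWhile, List.dropWhile,
        Bool.false_eq_true, if_false]
      split <;> rename_i hA <;> simp [hA]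

theorem pv_scan_spec (n : Nat) : ∀ cs : List Char, cs.length ≤ n →
    pvScan cs true = List.intercalate [' '] ((pvWords cs).map (List.filter PySem.Chars.isalnum)) ∧
    pvScan cs false = (pvWords cs).flatMap (fun w => ' ' :: w.filter PySem.Chars.isalnum) := by
  induction n with
  | zero =>
    intro cs h
    have : cs = [] := List.eq_nil_of_length_eq_zero (Nat.le_zero.mp h)
    subst this
    simp [pvScan, pvWords, List.intercalate]
  | succ n ih =>
    intro cs h
    cases cs with
    | nil => simp [pvScan, pvWords, List.intercalate]
    | cons c rest =>
      have hr : rest.length ≤ n := by simpa using Nat.lt_succ_iff.mp (Nat.lt_of_lt_of_le (Nat.lt_succ_of_le (Nat.le_refl _)) h)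
      by_cases hs : PySem.Chars.isspace c = true
      · constructor
        · rw [pvScan, if_pos hs, (ih rest hr).1]; simp [pvWords, hs]
        · rw [pvScan, if_pos hs, (ih rest hr).2]; simp [pvWords, hs]
      · have hs' : PySem.Chars.isspace c = false := by simpa using hs
        have hd : (rest.dropWhile (fun d => !PySem.Chars.isspace d)).length ≤ n :=
          Nat.le_trans (List.length_dropWhile_le _ _) hr
        have hrec := (ih _ hd).2
        have hcons : pvConsume (c :: rest) =
            ((c :: rest.takeWhile (fun d => !PySem.Chars.isspace d)).filter PySem.Chars.isalnum,
              rest.dropWhile (fun d => !PySem.Chars.isspace d)) := by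
          rw [pv_consume_eq]
          simp [List.takeWhile, List.dropWhile, hs']
        constructor
        · rw [pvScan, if_neg (by simp [hs']), hcons]
          simp only [if_pos]
          rw [hrec]
          have := pv_intercalate_cons
            ((c :: rest.takeWhile (fun d => !PySem.Chars.isspace d)).filter PySem.Chars.isalnum)
            ((pvWords (rest.dropWhile (fun d => !PySem.Chars.isspace d))).map (List.filter PySem.Chars.isalnum))
          rw [pvWords, if_neg (by simp [hs'])]
          simp [this, List.flatMap_map]
        · rw [pvScan, if_neg (by simp [hs']), hcons]
          simp only [Bool.false_eq_true, if_neg, not_false_iff]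
          rw [hrec, pvWords, if_neg (by simp [hs'])]
          simp
  
theorem pv_foldl_map (l : List String) (g : String → String) (init : List String) :
    l.foldl (fun acc w => acc ++ [g w]) init = init ++ l.map g := by
  induction l generalizing init with
  | nil => simp
  | cons x t ih => simp [List.foldl_cons, ih]

-- ===== VERDICT (by name: the statement is the Claim_ definition above) =====
theorem noSpecial_spec : Claim_equal_noSpecial := by
  intro s _
  unfold Spec_noSpecial noSpecial noSpecial_alt
  simp only [pv_foldl_map, List.nil_append]
  have hB : (String.ofList (pvScan s.toList true)).toList = pvScan s.toList true := by simp
  have hscan := (pv_scan_spec s.toList.length s.toList (Nat.le_refl _)).1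
  have hA : (PySem.Str.join " " ((PySem.Str.split₀ s).map
      (fun word => PySem.Str.join "" ((word.toList.filter PySem.Chars.isalnum).map (fun c => String.ofList [c]))))).toList
      = pvScan s.toList true := by
    have hg : ∀ w : List Char,
        (PySem.Str.join "" (((String.ofList w).toList.filter PySem.Chars.isalnum).map (fun c => String.ofList [c]))).toList
          = w.filter PySem.Chars.isalnum := by
      intro w
      rw [PySem.Str.toList_join]
      simp only [String.toList_ofList, List.map_map]
      simp only [Function.comp_def, String.toList_ofList]
      have h0 : ("" : String).toList = ([] : List Char) := by decide
      rw [h0]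
      exact PySem.Chars.join_nil_singletons _
    rw [PySem.Str.toList_join]
    simp only [PySem.Str.split₀, List.map_map, Function.comp_def]
    have hmap : (PySem.Chars.split₀ s.toList).map
        (fun w => (PySem.Str.join "" (((String.ofList w).toList.filter PySem.Chars.isalnum).map (fun c => String.ofList [c]))).toList)
        = (pvWords s.toList).map (List.filter PySem.Chars.isalnum) := by
      rw [pv_split₀_eq_words]
      exact List.map_congr_left (fun w _ => hg w)
    rw [hmap]
    have h1 : (" " : String).toList = [' '] := by decide
    rw [h1]
    show List.intercalate [' '] _ = _
    rw [hscan]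
  exact String.toList_inj.mp (by rw [hA, hB])
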